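-- pv_equiv track=rewrite | github.com/Thomas84/mint_pyrevit | CustomExtension.extension/Mint.tab/Experiment.panel/Test.pulldown/Create Family from CAD 2.pushbutton/script.py | CleanListandReconstruct
-- ===== SOURCE A (Python) =====
-- def CleanListandReconstruct(keywords, stringList):
--     words = []
--     for s in stringList:
--         try:
--             words.append(s.upper())
--         except:
--             pass
--     for k in keywords:
--         try:
--             words.remove(k.upper())
--         except:
--             pass
--     return words
-- ===== SOURCE B (Python) =====
-- def CleanListandReconstruct(keywords, stringList):
--     # Count each uppercased keyword (skip keywords whose .upper() raises),
--     # then one forward pass over stringList, dropping the earliest matches.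
--     counts = {}
--     for k in keywords:
--         try:
--             t = k.upper()
--         except:
--             continue
--         counts[t] = counts.get(t, 0) + 1
--     result = []
--     for s in stringList:
--         try:
--             t = s.upper()
--         except:
--             continue
--         c = counts.get(t, 0)
--         if c > 0:
--             counts[t] = c - 1
--         else:
--             result.append(t)
--     return result
-- ===== Notes on version B (the rewrite author's own statement) =====
-- stated objective: faster
-- what changed: Replaces the per-keyword list.remove scans with a counter dict of uppercased keywords and a single forward pass over stringList that drops the earliest matches, one per keyword occurrence.
import Mathlib
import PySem

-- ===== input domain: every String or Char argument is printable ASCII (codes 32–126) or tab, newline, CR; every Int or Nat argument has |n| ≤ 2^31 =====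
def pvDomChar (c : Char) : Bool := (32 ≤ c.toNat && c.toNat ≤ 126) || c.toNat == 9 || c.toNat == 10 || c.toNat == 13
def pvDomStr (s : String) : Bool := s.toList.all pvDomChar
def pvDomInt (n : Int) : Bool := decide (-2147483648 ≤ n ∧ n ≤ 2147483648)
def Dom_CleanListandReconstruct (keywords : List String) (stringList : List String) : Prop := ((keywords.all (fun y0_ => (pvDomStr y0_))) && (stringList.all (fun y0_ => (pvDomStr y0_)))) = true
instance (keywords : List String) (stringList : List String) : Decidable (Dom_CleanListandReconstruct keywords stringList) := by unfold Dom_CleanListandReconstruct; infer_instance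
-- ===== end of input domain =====

-- B replaces A's per-keyword list.remove scans by a counter of uppercased keywords
-- plus one forward pass over the list (objective: faster, O(n+m) dict operations).

-- ===== PORT A =====
-- words = []; for s in stringList: words.append(s.upper())   (upper never raises on str)
-- for k in keywords: try: words.remove(k.upper()) except: pass   (absent -> ValueError -> keep)
def CleanListandReconstruct (keywords : List String) (stringList : List String) : List String :=
  let words := stringList.foldl (fun ws s => ws ++ [PySem.Str.upper s]) []
  keywords.foldl (fun ws k => (PySem.List.remove? ws (PySem.Str.upper k)).getD ws) words

-- ===== PORT B =====
-- counts[t] = counts.get(t,0)+1 for each uppercased keyword; then one pass over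
-- stringList dropping t while counts.get(t,0) > 0 (decrementing), else appending t.
def CleanListandReconstruct_alt (keywords : List String) (stringList : List String) : List String :=
  let counts : PySem.Dict String Int :=
    keywords.foldl (fun d k =>
      let t := PySem.Str.upper k
      d.insert t (d.getD t 0 + 1)) PySem.Dict.empty
  (stringList.foldl (fun (st : PySem.Dict String Int × List String) s =>
      let t := PySem.Str.upper s
      let c := st.1.getD t 0
      if c > 0 then (st.1.insert t (c - 1), st.2) else (st.1, st.2 ++ [t]))
    (counts, [])).2

-- ===== PRECONDITION & SPEC =====
def Spec_CleanListandReconstruct (keywords : List String) (stringList : List String) (out : List String) : Prop := out = CleanListandReconstruct_alt keywords stringList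
instance (keywords : List String) (stringList : List String) (out : List String) : Decidable (Spec_CleanListandReconstruct keywords stringList out) := by unfold Spec_CleanListandReconstruct; infer_instance

-- ===== CLAIM (what is proved, stated in full; the proofs are below) =====
def Claim_equal_CleanListandReconstruct : Prop := ∀ (keywords : List String) (stringList : List String), Dom_CleanListandReconstruct keywords stringList → Spec_CleanListandReconstruct keywords stringList (CleanListandReconstruct keywords stringList)

-- ===== LEMMAS AND PROOFS =====

-- Abstract one-pass filter with a decrementing multiplicity function.
def pvPass (f : String → Int) : List String → List String
  | [] => []
  | w :: ws =>
    if f w > 0 then pvPass (fun t => if t = w then f w - 1 else f t) ws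
    else w :: pvPass f ws

theorem pvPass_zero (ws : List String) : pvPass (fun _ => (0 : Int)) ws = ws := by
  induction ws with
  | nil => rfl
  | cons w ws ih => simp [pvPass, ih]

-- A's append loop builds the uppercased map.
theorem pv_appendLoop (l : List String) (acc : List String) :
    l.foldl (fun ws s => ws ++ [PySem.Str.upper s]) acc = acc ++ l.map PySem.Str.upper := by
  induction l generalizing acc with
  | nil => simp
  | cons s l ih => simp [List.foldl_cons, ih]

-- try: words.remove(v) except: pass  ==  List.erase
theorem pv_removeStep (ws : List String) (v : String) :
    (PySem.List.remove? ws v).getD ws = ws.erase v := by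
  by_cases h : v ∈ ws
  · rw [PySem.List.remove?_eq_some_erase ws v h]; rfl
  · rw [(PySem.List.remove?_eq_none_iff ws v).mpr h, List.erase_of_not_mem h]; rfl

-- Key lemma: erasing the first k after the pass = running the pass with one more k budget.
theorem pv_erase_pass (ws : List String) (f : String → Int) (k : String)
    (hf : ∀ t, 0 ≤ f t) :
    (pvPass f ws).erase k = pvPass (fun t => if t = k then f t + 1 else f t) ws := by
  induction ws generalizing f with
  | nil => rfl
  | cons w ws ih =>
    by_cases h : f w > 0
    · have h2 : (if w = k then f w + 1 else f w) > 0 := by split <;> omega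
      rw [pvPass, if_pos h, pvPass, if_pos h2]
      rw [ih _ (by intro t; have := hf t; have := hf w; split <;> omega)]
      congr 1
      funext t
      by_cases h1 : w = k <;> by_cases h2 : t = w <;> by_cases h3 : t = k <;>
        first
        | (simp_all <;> omega)
        | simp_all
    · rw [pvPass, if_neg h]
      by_cases hwk : w = k
      · subst hwk
        have h3 := hf w
        have h2 : (if w = w then f w + 1 else f w) > 0 := by rw [if_pos rfl]; omega
        rw [List.erase_cons_head, pvPass, if_pos h2]
        congr 1
        funext t
        by_cases htw : t = w <;> simp [htw]
      · have h2 : ¬ ((if w = k then f w + 1 else f w) > 0) := by rw [if_neg hwk]; exact h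
        rw [List.erase_cons_tail (by simpa using fun hh => hwk hh), pvPass, if_neg h2,
          ih f hf]

-- A's removal loop over uppercased keys, expressed on the abstract pass.
theorem pv_removeAll (ks : List String) (f : String → Int) (ws : List String)
    (hf : ∀ t, 0 ≤ f t) :
    ks.foldl (fun ws k => ws.erase k) (pvPass f ws) =
      pvPass (fun t => f t + (ks.count t : Int)) ws := by
  induction ks generalizing f with
  | nil => simp
  | cons k ks ih =>
    rw [List.foldl_cons, pv_erase_pass ws f k hf,
      ih _ (by intro t; have := hf t; split <;> omega)]
    congr 1
    funext t
    by_cases htk : t = k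
    · subst htk
      simp only [List.count_cons, beq_self_eq_true, if_true]
      push_cast
      omega
    · simp only [List.count_cons]
      have hbe : (k == t) = false := by simpa using fun hh => htk hh.symm
      simp [hbe, htk]

-- B's counter: getD is the count of uppercased keywords.
theorem pv_counter (keywords : List String) (t : String) :
    (keywords.foldl (fun d k =>
        d.insert (PySem.Str.upper k) (d.getD (PySem.Str.upper k) 0 + 1))
      (PySem.Dict.empty : PySem.Dict String Int)).getD t 0 =
      ((keywords.map PySem.Str.upper).count t : Int) := by
  have h : (keywords.map PySem.Str.upper).foldl
        (fun (d : PySem.Dict String Int) x => d.insert x (d.getD x 0 + 1))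
        PySem.Dict.empty =
      keywords.foldl (fun d k =>
        d.insert (PySem.Str.upper k) (d.getD (PySem.Str.upper k) 0 + 1))
        PySem.Dict.empty := List.foldl_map
  rw [← h, PySem.Dict.getD_foldl_insert_add_one]
  simp

-- B's forward pass equals the abstract pass, given the dict realises f.
theorem pv_passLoop (ws : List String) (d : PySem.Dict String Int) (res : List String)
    (f : String → Int) (hd : ∀ t, d.getD t 0 = f t) :
    (ws.foldl (fun (st : PySem.Dict String Int × List String) t =>
        let c := st.1.getD t 0
        if c > 0 then (st.1.insert t (c - 1), st.2) else (st.1, st.2 ++ [t]))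
      (d, res)).2 = res ++ pvPass f ws := by
  induction ws generalizing d res f with
  | nil => simp [pvPass]
  | cons w ws ih =>
    rw [List.foldl_cons]
    by_cases h : f w > 0
    · simp only [hd w, if_pos h]
      rw [ih _ res (fun t => if t = w then f w - 1 else f t)
        (by intro t; rw [PySem.Dict.getD_insert]; split <;> simp [*])]
      rw [pvPass, if_pos h]
    · simp only [hd w, if_neg h]
      rw [ih d (res ++ [w]) f hd, pvPass, if_neg h, List.append_assoc]
      rfl

-- ===== VERDICT (by name: the statement is the Claim_ definition above) =====
theorem CleanListandReconstruct_spec : Claim_equal_CleanListandReconstruct := by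
  intro keywords stringList _
  unfold Spec_CleanListandReconstruct CleanListandReconstruct CleanListandReconstruct_alt
  rw [pv_appendLoop, List.nil_append]
  have hstep : (fun (ws : List String) k => (PySem.List.remove? ws (PySem.Str.upper k)).getD ws)
      = fun ws k => ws.erase (PySem.Str.upper k) := by
    funext ws k; exact pv_removeStep ws (PySem.Str.upper k)
  have hA : keywords.foldl (fun ws k => ws.erase (PySem.Str.upper k))
      (stringList.map PySem.Str.upper) =
      (keywords.map PySem.Str.upper).foldl (fun ws k => ws.erase k)
        (stringList.map PySem.Str.upper) := List.foldl_map.symm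
  rw [hstep, hA]
  conv_lhs => rw [← pvPass_zero (stringList.map PySem.Str.upper)]
  rw [pv_removeAll _ _ _ (fun _ => le_refl 0)]
  have hB := pv_passLoop (stringList.map PySem.Str.upper)
      (keywords.foldl (fun d k =>
        d.insert (PySem.Str.upper k) (d.getD (PySem.Str.upper k) 0 + 1))
        (PySem.Dict.empty : PySem.Dict String Int)) []
      (fun t => ((keywords.map PySem.Str.upper).count t : Int))
      (pv_counter keywords)
  rw [List.foldl_map] at hB
  rw [hB, List.nil_append]
  congr 1
  funext t
  omega
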